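-- pv_equiv track=rewrite | github.com/JosephDenman/wrds-data | scripts/download_all.py | compute_year_ranges
-- ===== SOURCE A (Python) =====
-- def compute_year_ranges(
--     start_year: int, end_year: int, chunk_years: int = 1
-- ) -> list[tuple[int, int]]:
--     """Split a year range into chunks."""
--     ranges = []
--     yr = start_year
--     while yr <= end_year:
--         chunk_end = min(yr + chunk_years - 1, end_year)
--         ranges.append((yr, chunk_end))
--         yr = chunk_end + 1
--     return ranges
-- ===== SOURCE B (Python) =====
-- def compute_year_ranges(
--     start_year: int, end_year: int, chunk_years: int = 1
-- ) -> list[tuple[int, int]]: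
--     """Split a year range into chunks: count the chunks in closed form,
--     emit the full-size chunks arithmetically, then append the clamped last one."""
--     n = (end_year - start_year + chunk_years) // chunk_years  # ceil chunk count
--     if n <= 0:
--         return []
--     ranges = [
--         (start_year + i * chunk_years, start_year + (i + 1) * chunk_years - 1)
--         for i in range(n - 1)
--     ]
--     ranges.append((start_year + (n - 1) * chunk_years, end_year))
--     return ranges
-- ===== Notes on version B (the rewrite author's own statement) =====
-- stated objective: alternative
-- what changed: Replaces A's cursor-threading while-loop (yr = chunk_end + 1 with a per-step min clamp) by a closed-form ceiling-division chunk count, an arithmetic generation of the full-size chunks with no clamping, and a separately appended final chunk ending at end_year.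
-- outside the precondition, e.g. on compute_year_ranges(5, 3, 0): A returns [], B raises ZeroDivisionError; on compute_year_ranges(5, 3, -1): A returns [], B returns [(5, 3), (4, 2), (3, 3)]
import Mathlib
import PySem

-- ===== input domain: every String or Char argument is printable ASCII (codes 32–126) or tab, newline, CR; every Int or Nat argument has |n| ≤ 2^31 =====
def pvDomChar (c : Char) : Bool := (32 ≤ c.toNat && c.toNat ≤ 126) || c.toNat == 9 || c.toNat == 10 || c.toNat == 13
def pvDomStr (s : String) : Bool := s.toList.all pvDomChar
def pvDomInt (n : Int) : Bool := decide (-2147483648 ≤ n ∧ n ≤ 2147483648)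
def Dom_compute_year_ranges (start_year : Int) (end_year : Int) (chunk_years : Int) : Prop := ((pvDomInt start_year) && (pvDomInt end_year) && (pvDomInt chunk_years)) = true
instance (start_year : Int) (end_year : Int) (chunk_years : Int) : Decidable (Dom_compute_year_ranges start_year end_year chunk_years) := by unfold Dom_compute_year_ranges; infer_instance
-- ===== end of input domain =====

-- B replaces A's cursor-threading while-loop by a closed-form chunk count plus arithmetic chunk generation with a separately appended final chunk; same output on Pre_ (chunk_years ≥ 1).


-- ===== PORT A =====
-- A's while-loop; fuel only makes the recursion total (enough fuel on every Pre_ input).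
def pvLoopA (end_year chunk_years : Int) : Nat → Int → List (Int × Int) → List (Int × Int)
  | 0, _, ranges => ranges
  | fuel + 1, yr, ranges =>
    if yr ≤ end_year then
      let chunk_end := min (yr + chunk_years - 1) end_year
      pvLoopA end_year chunk_years fuel (chunk_end + 1) (ranges ++ [(yr, chunk_end)])
    else ranges

def compute_year_ranges (start_year : Int) (end_year : Int) (chunk_years : Int) : List (Int × Int) :=
  pvLoopA end_year chunk_years (end_year + 1 - start_year).toNat start_year []

-- ===== PORT B =====
def compute_year_ranges_alt (start_year : Int) (end_year : Int) (chunk_years : Int) : List (Int × Int) :=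
  let n := PySem.Int.floordiv (end_year - start_year + chunk_years) chunk_years
  if n ≤ 0 then []
  else
    ((List.range (n - 1).toNat).map
      (fun (i : Nat) => (start_year + (i : Int) * chunk_years, start_year + ((i : Int) + 1) * chunk_years - 1)))
      ++ [(start_year + (n - 1) * chunk_years, end_year)]

-- ===== PRECONDITION & SPEC =====
-- Pre_ excludes non-positive chunk_years: there A loops forever whenever start_year ≤ end_year,
-- and when start_year > end_year A returns only an accidental [] while B's ceiling division raises
-- (chunk_years = 0) or emits spurious descending chunks (chunk_years < 0).
def Pre_compute_year_ranges (start_year : Int) (end_year : Int) (chunk_years : Int) : Prop :=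
  1 ≤ chunk_years
instance (start_year : Int) (end_year : Int) (chunk_years : Int) : Decidable (Pre_compute_year_ranges start_year end_year chunk_years) := by unfold Pre_compute_year_ranges; infer_instance

def pvWitness_compute_year_ranges : Int × Int × Int := (2000, 2005, 2)

def Spec_compute_year_ranges (start_year : Int) (end_year : Int) (chunk_years : Int) (out : List (Int × Int)) : Prop := out = compute_year_ranges_alt start_year end_year chunk_years
instance (start_year : Int) (end_year : Int) (chunk_years : Int) (out : List (Int × Int)) : Decidable (Spec_compute_year_ranges start_year end_year chunk_years out) := by unfold Spec_compute_year_ranges; infer_instance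

-- ===== CLAIM (what is proved, stated in full; the proofs are below) =====
def Claim_equal_compute_year_ranges : Prop := ∀ (start_year : Int) (end_year : Int) (chunk_years : Int), Dom_compute_year_ranges start_year end_year chunk_years → Pre_compute_year_ranges start_year end_year chunk_years → Spec_compute_year_ranges start_year end_year chunk_years (compute_year_ranges start_year end_year chunk_years)

-- ===== LEMMAS AND PROOFS =====

-- proof-only intermediate: the chunk list described recursively (k chunks starting at yr, last one ends at e)
def bChunks (e c : Int) : Nat → Int → List (Int × Int)
  | 0, _ => []
  | k + 1, yr => if k = 0 then [(yr, e)] else (yr, yr + c - 1) :: bChunks e c k (yr + c)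

theorem bChunks_eq_closed (e c : Int) :
    ∀ (k : Nat) (yr : Int), bChunks e c (k + 1) yr
      = ((List.range k).map
          (fun (i : Nat) => (yr + (i : Int) * c, yr + ((i : Int) + 1) * c - 1)))
        ++ [(yr + (k : Int) * c, e)] := by
  intro k
  induction k with
  | zero => intro yr; simp [bChunks]
  | succ m ih =>
    intro yr
    rw [bChunks, if_neg (by omega)]
    rw [ih (yr + c)]
    rw [List.range_succ_eq_map, List.map_cons, List.map_map, List.cons_append]
    congr 1
    · rw [Prod.mk.injEq]; push_cast; constructor <;> ring
    congr 1
    · apply List.map_congr_left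
      intro i _
      simp only [Function.comp_apply]
      rw [Prod.mk.injEq]; push_cast; constructor <;> ring
    · congr 1
      rw [Prod.mk.injEq]; push_cast; constructor <;> ring

theorem loopA_eq_bChunks (e c : Int) (hc : 1 ≤ c) :
    ∀ (fuel : Nat) (yr : Int) (acc : List (Int × Int)), e + 1 - yr ≤ (fuel : Int) →
      pvLoopA e c fuel yr acc
        = acc ++ bChunks e c (PySem.Int.floordiv (e - yr + c) c).toNat yr := by
  intro fuel
  induction fuel with
  | zero =>
    intro yr acc h
    have hk : PySem.Int.floordiv (e - yr + c) c < 1 := by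
      rw [PySem.Int.floordiv_lt_iff_lt_mul (by omega : (0:Int) < c)]
      omega
    have : (PySem.Int.floordiv (e - yr + c) c).toNat = 0 := by omega
    rw [this]
    simp [pvLoopA, bChunks]
  | succ m ih =>
    intro yr acc h
    rw [pvLoopA]
    by_cases hle : yr ≤ e
    · rw [if_pos hle]
      have hk1 : 1 ≤ PySem.Int.floordiv (e - yr + c) c := by
        rw [PySem.Int.le_floordiv_iff_mul_le (by omega : (0:Int) < c)]
        omega
      by_cases hfull : yr + c - 1 ≤ e
      · -- full chunk: min = yr + c - 1, cursor moves to yr + c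
        have hmin : min (yr + c - 1) e = yr + c - 1 := by omega
        rw [hmin, ih (yr + c - 1 + 1) _ (by omega)]
        have harg : e - (yr + c - 1 + 1) + c = e - yr := by ring
        rw [harg]
        have hstep : PySem.Int.floordiv (e - yr + c) c = PySem.Int.floordiv (e - yr) c + 1 := by
          rw [PySem.Int.floordiv_eq_ediv_of_pos (by omega : (0:Int) < c),
              PySem.Int.floordiv_eq_ediv_of_pos (by omega : (0:Int) < c)]
          have : e - yr + c = e - yr + 1 * c := by ring
          rw [this, Int.add_mul_ediv_right _ _ (by omega : c ≠ 0)]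
        have hnn : 0 ≤ PySem.Int.floordiv (e - yr) c := by
          rw [PySem.Int.floordiv_eq_ediv_of_pos (by omega : (0:Int) < c)]
          exact Int.ediv_nonneg (by omega) (by omega)
        have htn : (PySem.Int.floordiv (e - yr + c) c).toNat
            = (PySem.Int.floordiv (e - yr) c).toNat + 1 := by omega
        rw [htn, bChunks]
        by_cases hz : (PySem.Int.floordiv (e - yr) c).toNat = 0
        · -- last chunk: k = 1, and yr + c - 1 = e here
          have hlt : PySem.Int.floordiv (e - yr) c < 1 := by omega
          rw [PySem.Int.floordiv_lt_iff_lt_mul (by omega : (0:Int) < c)] at hlt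
          have heq : yr + c - 1 = e := by omega
          rw [if_pos hz, hz]
          simp [bChunks, heq]
        · rw [if_neg hz]
          have harg2 : yr + c - 1 + 1 = yr + c := by ring
          rw [harg2]
          simp
      · -- final partial chunk: min = e, cursor moves past e
        have hmin : min (yr + c - 1) e = e := by omega
        rw [hmin, ih (e + 1) _ (by omega)]
        have hz2 : PySem.Int.floordiv (e - (e + 1) + c) c < 1 := by
          rw [PySem.Int.floordiv_lt_iff_lt_mul (by omega : (0:Int) < c)]
          omega
        have hnn2 : 0 ≤ PySem.Int.floordiv (e - (e + 1) + c) c := by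
          rw [PySem.Int.floordiv_eq_ediv_of_pos (by omega : (0:Int) < c)]
          exact Int.ediv_nonneg (by omega) (by omega)
        have hk2 : PySem.Int.floordiv (e - yr + c) c < 2 := by
          rw [PySem.Int.floordiv_lt_iff_lt_mul (by omega : (0:Int) < c)]
          omega
        have h1 : (PySem.Int.floordiv (e - yr + c) c).toNat = 1 := by omega
        have h0 : (PySem.Int.floordiv (e - (e + 1) + c) c).toNat = 0 := by omega
        rw [h1, h0]
        simp [bChunks]
    · rw [if_neg hle]
      have hk : PySem.Int.floordiv (e - yr + c) c < 1 := by
        rw [PySem.Int.floordiv_lt_iff_lt_mul (by omega : (0:Int) < c)]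
        omega
      have : (PySem.Int.floordiv (e - yr + c) c).toNat = 0 := by omega
      rw [this]
      simp [bChunks]

-- ===== VERDICT (by name: the statement is the Claim_ definition above) =====
theorem compute_year_ranges_spec : Claim_equal_compute_year_ranges := by
  intro s e c _ hc
  unfold Spec_compute_year_ranges compute_year_ranges compute_year_ranges_alt
  rw [loopA_eq_bChunks e c hc _ s [] (by omega)]
  simp only [List.nil_append]
  set n := PySem.Int.floordiv (e - s + c) c with hn
  by_cases hle : n ≤ 0
  · have : n.toNat = 0 := by omega
    rw [this, if_pos hle]
    simp [bChunks]
  · rw [if_neg hle]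
    have hk : n.toNat = (n - 1).toNat + 1 := by omega
    rw [hk, bChunks_eq_closed]
    have hcast : ((n - 1).toNat : Int) = n - 1 := by omega
    rw [hcast]
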